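-- pv_equiv track=rewrite | github.com/Royalvice/OmniNav | tests/examples/test_examples_smoke.py | _has_unhandled_traceback
-- ===== SOURCE A (Python) =====
-- def _has_unhandled_traceback(output: str) -> bool:
--     """
--     Return True only for uncaught tracebacks.
--
--     Python's logging module may print "Traceback (most recent call last)"
--     blocks under "--- Logging error ---" while the process still exits
--     successfully. Those are treated as non-fatal for smoke validation.
--     """
--     lines = output.splitlines()
--     for idx, line in enumerate(lines):
--         if "Traceback (most recent call last):" not in line:
--             continue
--         context = lines[max(0, idx - 3) : idx]
--         if any("--- Logging error ---" in item for item in context):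
--             continue
--         return True
--     return False
-- ===== SOURCE B (Python) =====
-- def _has_unhandled_traceback(output: str) -> bool:
--     # Single streaming pass: track how many lines have elapsed since the last
--     # "--- Logging error ---" marker; a traceback marker counts as uncaught
--     # unless an error marker appeared within the previous three lines.
--     since_error = None
--     for line in output.splitlines():
--         if "Traceback (most recent call last):" in line:
--             if since_error is None or since_error >= 3:
--                 return True
--         if "--- Logging error ---" in line:
--             since_error = 0
--         elif since_error is not None:
--             since_error += 1
--     return False
-- ===== Notes on version B (the rewrite author's own statement) =====
-- stated objective: alternative
-- what changed: B is a single streaming pass that carries a counter of lines elapsed since the last logging-error marker and flags a traceback line when that counter is absent or at least 3, instead of A's re-slicing a 3-line context window out of the line list at every traceback marker.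
import Mathlib
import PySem

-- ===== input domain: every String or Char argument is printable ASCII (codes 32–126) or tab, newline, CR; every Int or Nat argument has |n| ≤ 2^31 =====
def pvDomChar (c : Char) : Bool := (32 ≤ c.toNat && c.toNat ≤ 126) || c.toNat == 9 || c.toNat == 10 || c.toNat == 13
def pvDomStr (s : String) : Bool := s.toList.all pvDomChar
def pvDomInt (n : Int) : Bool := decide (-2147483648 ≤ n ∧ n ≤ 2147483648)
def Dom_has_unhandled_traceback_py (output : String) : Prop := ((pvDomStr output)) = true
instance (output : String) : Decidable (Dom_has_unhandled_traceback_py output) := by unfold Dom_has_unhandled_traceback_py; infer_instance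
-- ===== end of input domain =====

-- B replaces A's per-marker 3-line window slice by a single streaming pass that carries a
-- "lines since the last logging-error marker" counter; objective: alternative decomposition,
-- same exact result.

-- ===== PORT A =====
def pvA_loop (lines : List String) : List (Int × String) → Bool
  | [] => false
  | (idx, line) :: rest =>
    if !(PySem.Str.isIn "Traceback (most recent call last):" line) then pvA_loop lines rest
    else
      let context := PySem.List.slice lines (some (max 0 (idx - 3))) (some idx)
      if context.any (fun item => PySem.Str.isIn "--- Logging error ---" item) then
        pvA_loop lines rest
      else true

def has_unhandled_traceback_py (output : String) : Bool :=
  let lines := PySem.Str.splitlines output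
  pvA_loop lines (PySem.List.enumerate lines 0)

-- ===== PORT B =====
-- state update at the end of each loop iteration in Source B
def pvB_step (since : Option Int) (line : String) : Option Int :=
  if PySem.Str.isIn "--- Logging error ---" line then some 0
  else match since with
    | none => none
    | some n => some (n + 1)

def pvB_loop (since : Option Int) : List String → Bool
  | [] => false
  | line :: rest =>
    if PySem.Str.isIn "Traceback (most recent call last):" line
        && (match since with | none => true | some s => decide (3 ≤ s)) then true
    else pvB_loop (pvB_step since line) rest

def has_unhandled_traceback_py_alt (output : String) : Bool :=
  pvB_loop none (PySem.Str.splitlines output)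

-- ===== PRECONDITION & SPEC =====
def Spec_has_unhandled_traceback_py (output : String) (out : Bool) : Prop := out = has_unhandled_traceback_py_alt output
instance (output : String) (out : Bool) : Decidable (Spec_has_unhandled_traceback_py output out) := by unfold Spec_has_unhandled_traceback_py; infer_instance

-- ===== CLAIM (what is proved, stated in full; the proofs are below) =====
def Claim_equal_has_unhandled_traceback_py : Prop := ∀ (output : String), Dom_has_unhandled_traceback_py output → Spec_has_unhandled_traceback_py output (has_unhandled_traceback_py output)

-- ===== LEMMAS AND PROOFS =====

-- the state B's loop carries when it reaches line k (proof-side reconstruction)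
def pvSt (lines : List String) : Nat → Option Int
  | 0 => none
  | k + 1 => pvB_step (pvSt lines k) (lines.getD k "")

def pvErr (line : String) : Bool := PySem.Str.isIn "--- Logging error ---" line

def pvAnyLe (o : Option Int) (m : Int) : Bool :=
  match o with | none => false | some s => decide (s ≤ m)

theorem pvSt_nonneg (lines : List String) : ∀ k s, pvSt lines k = some s → 0 ≤ s := by
  intro k
  induction k with
  | zero => intro s h; simp [pvSt] at h
  | succ k ih =>
    intro s h
    simp only [pvSt, pvB_step] at h
    split at h
    · cases h; omega
    · cases hst : pvSt lines k with
      | none => rw [hst] at h; simp at h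
      | some n => rw [hst] at h; cases h; have := ih n hst; omega

-- characterisation: the counter is ≤ m iff a logging-error line occurs in the last m+1 lines
theorem pvSt_anyLe (lines : List String) :
    ∀ (k m : Nat), pvAnyLe (pvSt lines k) (m : Int) = true
      ↔ ∃ e : Nat, k - (m + 1) ≤ e ∧ e < k ∧ pvErr (lines.getD e "") = true := by
  intro k
  induction k with
  | zero => intro m; simp [pvSt, pvAnyLe]
  | succ k ih =>
    intro m
    by_cases he : pvErr (lines.getD k "") = true
    · have h1 : pvSt lines (k + 1) = some 0 := by
        simp [pvSt, pvB_step, pvErr] at he ⊢; simp [he]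
      rw [h1]
      simp only [pvAnyLe, decide_eq_true_eq]
      constructor
      · intro _; exact ⟨k, by omega, by omega, he⟩
      · intro _; positivity
    · have he' : pvErr (lines.getD k "") = false := by simpa using he
      have h1 : pvSt lines (k + 1) = match pvSt lines k with
          | none => none | some n => some (n + 1) := by
        simp [pvSt, pvB_step, pvErr] at he' ⊢; simp [he']
      cases m with
      | zero =>
        have lhs : pvAnyLe (pvSt lines (k + 1)) ((0 : Nat) : Int) = false := by
          rw [h1]; cases hst : pvSt lines k with
          | none => simp [pvAnyLe]
          | some n => have := pvSt_nonneg lines k n hst; simp [pvAnyLe]; omega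
        rw [lhs]
        simp only [Bool.false_eq_true, false_iff]
        rintro ⟨e, h1e, h2e, h3e⟩
        have : e = k := by omega
        subst this; rw [he'] at h3e; exact absurd h3e (by simp)
      | succ m' =>
        have lhs : pvAnyLe (pvSt lines (k + 1)) ((m' + 1 : Nat) : Int)
            = pvAnyLe (pvSt lines k) ((m' : Nat) : Int) := by
          rw [h1]; cases hst : pvSt lines k with
          | none => simp [pvAnyLe]
          | some n =>
            simp only [pvAnyLe]
            rw [Bool.eq_iff_iff]; simp only [decide_eq_true_eq]; push_cast; omega
        rw [lhs, ih m']
        constructor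
        · rintro ⟨e, h1e, h2e, h3e⟩; exact ⟨e, by omega, by omega, h3e⟩
        · rintro ⟨e, h1e, h2e, h3e⟩
          rcases Nat.lt_or_ge e k with h | h
          · exact ⟨e, by omega, h, h3e⟩
          · have : e = k := by omega
            subst this; rw [he'] at h3e; exact absurd h3e (by simp)

-- A's 3-line window check at index k equals "counter ≤ 2"
theorem window_eq (lines : List String) (k : Nat) (hk : k < lines.length) :
    (PySem.List.slice lines (some (max 0 ((k : Int) - 3))) (some (k : Int))).any
        (fun item => PySem.Str.isIn "--- Logging error ---" item)
      = pvAnyLe (pvSt lines k) 2 := by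
  have haN : max 0 ((k : Int) - 3) = ((k - 3 : Nat) : Int) := by omega
  rw [haN, PySem.List.slice_natCast]
  have h2 : ((2 : Nat) : Int) = (2 : Int) := by norm_num
  rw [Bool.eq_iff_iff, ← h2, pvSt_anyLe, List.any_eq_true]
  constructor
  · rintro ⟨x, hx, hPx⟩
    rw [List.mem_iff_getElem] at hx
    obtain ⟨j, hj, hxj⟩ := hx
    rw [List.getElem_take, List.getElem_drop] at hxj
    have hlt : k - 3 + j < k := by
      have := List.length_take_le (k - (k - 3)) (lines.drop (k - 3))
      omega
    refine ⟨k - 3 + j, by omega, hlt, ?_⟩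
    rw [List.getD_eq_getElem _ _ (by omega), hxj]
    simpa [pvErr] using hPx
  · rintro ⟨e, h1e, h2e, h3e⟩
    have helen : e < lines.length := by omega
    refine ⟨lines[e], ?_, by
      simp only [pvErr] at h3e
      rwa [List.getD_eq_getElem _ _ helen] at h3e⟩
    rw [List.mem_iff_getElem]
    refine ⟨e - (k - 3), ?_, ?_⟩
    · rw [List.length_take, List.length_drop]; omega
    · rw [List.getElem_take, List.getElem_drop]
      congr 1; omega

-- B's guard is the negation of A's window check
theorem guard_eq (lines : List String) (k : Nat) (hk : k < lines.length) :
    (match pvSt lines k with | none => true | some s => decide (3 ≤ s))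
      = !(PySem.List.slice lines (some (max 0 ((k : Int) - 3))) (some (k : Int))).any
          (fun item => PySem.Str.isIn "--- Logging error ---" item) := by
  rw [window_eq lines k hk]
  cases hst : pvSt lines k with
  | none => simp [pvAnyLe]
  | some s =>
    simp only [pvAnyLe]
    rw [Bool.eq_iff_iff]; simp; omega

theorem loop_eq (lines : List String) :
    ∀ (suf : List String) (k : Nat), lines.drop k = suf →
      pvA_loop lines (PySem.List.enumerate suf (k : Int)) = pvB_loop (pvSt lines k) suf := by
  intro suf
  induction suf with
  | nil => intro k _; simp [PySem.List.enumerate_nil, pvA_loop, pvB_loop]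
  | cons line rest ih =>
    intro k hdrop
    have hk : k < lines.length := by
      by_contra h
      rw [List.drop_eq_nil_of_le (by omega)] at hdrop
      exact absurd hdrop (by simp)
    have hget : lines[k]? = some line := by
      have h0 : (lines.drop k)[0]? = some line := by rw [hdrop]; rfl
      rw [List.getElem?_drop] at h0; simpa using h0
    have hdrop' : lines.drop (k + 1) = rest := by
      rw [← List.drop_drop, hdrop]; rfl
    have hcast : (k : Int) + 1 = ((k + 1 : Nat) : Int) := by push_cast; ring
    rw [PySem.List.enumerate_cons, hcast]
    have hstep : pvSt lines (k + 1) = pvB_step (pvSt lines k) line := by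
      simp [pvSt, hget]
    by_cases htb : PySem.Str.isIn "Traceback (most recent call last):" line = true
    · have hg := guard_eq lines k hk
      by_cases hw : (PySem.List.slice lines (some (max 0 ((k : Int) - 3))) (some (k : Int))).any
          (fun item => PySem.Str.isIn "--- Logging error ---" item) = true
      · have hg' : (match pvSt lines k with | none => true | some s => decide (3 ≤ s)) = false := by
          rw [hg, hw]; rfl
        simp only [pvA_loop, pvB_loop, htb, hg', hw, Bool.not_true, Bool.and_false,
          Bool.false_eq_true, if_false, if_true]
        have h := ih (k + 1) hdrop'
        rw [hstep] at h
        exact h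
      · have hw' : (PySem.List.slice lines (some (max 0 ((k : Int) - 3))) (some (k : Int))).any
            (fun item => PySem.Str.isIn "--- Logging error ---" item) = false := by
          simpa using hw
        have hg' : (match pvSt lines k with | none => true | some s => decide (3 ≤ s)) = true := by
          rw [hg, hw']; rfl
        simp only [pvA_loop, pvB_loop, htb, hg', hw', Bool.not_true, Bool.and_true,
          Bool.false_eq_true, if_false, if_true]
    · have htb' : PySem.Str.isIn "Traceback (most recent call last):" line = false := by
        simpa using htb
      simp only [pvA_loop, pvB_loop, htb', Bool.not_false, Bool.false_and,
        Bool.false_eq_true, if_false, if_true]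
      have h := ih (k + 1) hdrop'
      rw [hstep] at h
      exact h

-- ===== VERDICT (by name: the statement is the Claim_ definition above) =====
theorem has_unhandled_traceback_py_spec : Claim_equal_has_unhandled_traceback_py := by
  intro output _
  unfold Spec_has_unhandled_traceback_py has_unhandled_traceback_py has_unhandled_traceback_py_alt
  have := loop_eq (PySem.Str.splitlines output) (PySem.Str.splitlines output) 0 (by simp)
  simpa [pvSt] using this
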